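-- pv_equiv track=rewrite | github.com/vanishcode/hl7-medical-monitor-system | view/parse/hl72json.py | segment_fields_to_json
-- ===== SOURCE A (Python) =====
-- INDENT = '  '
--
-- KEY_FIELD = '^~\&'
--
-- def is_json_object(value):
--     return '{' in value
--
-- def is_json_boolean(value):
--     return value.lower() == 'true' or value.lower() == 'false'
--
-- def is_json_string(value):
--     return (not value.isdigit()) and (not is_json_object(value)) and (
--         not is_json_boolean(value))
--
-- def build_json_property(key, value, indent_level):
--     if is_json_string(value):
--         value = '"' + value + '"'
--
--     indent = INDENT * indent_level
--     return indent + '"' + key + '": ' + value + ',\n'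
--
-- def component_parts_to_json(component_name, component_parts, indent_level):
--     indent = INDENT * indent_level
--     json = '\n' + indent + '{\n'
--
--     for index, part in enumerate(component_parts):
--         if len(part) == 0:
--             continue
--
--         part_name = component_name + '.' + str(index + 1)
--         json = json + build_json_property(part_name, part, indent_level + 1)
--
--     json = json + indent + '}\n'
--     return json
--
-- def field_components_to_json(field_name, field_components, indent_level):
--     indent = INDENT * indent_level
--     json = '\n' + indent + '{\n'
--
--     for index, component in enumerate(field_components):
--         if len(component.replace('~', '')) == 0:
--             continue
--
--         component_name = field_name + '.' + str(index + 1)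
--
--         component_parts = component.split('~')
--         if len(component_parts) == 1:
--             component_parts_json = component_parts[0]
--         else:
--             component_parts_json = component_parts_to_json(
--                 component_name, component_parts, indent_level + 1)
--
--         json = json + build_json_property(component_name, component_parts_json,
--                                           indent_level + 1)
--
--     json = json + indent + '}\n'
--     return json
--
-- def segment_fields_to_json(segment_name, segment_fields, indent_level):
--     indent = INDENT * indent_level
--     json = '\n' + indent + '{\n'
--     for index, field in enumerate(segment_fields):
--         if len(field.replace('^', '')) == 0:
--             continue
--         if field == KEY_FIELD:
--             continue
--
--         field_name = segment_name + '.' + str(index + 1)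
--
--         field_components = field.split('^')
--         if len(field_components) == 1:
--             field_components_json = field_components[0]
--         else:
--             field_components_json = field_components_to_json(
--                 field_name, field_components, indent_level + 1)
--
--         json = json + build_json_property(field_name, field_components_json,
--                                           indent_level + 1)
--
--     json = json + indent + '}\n'
--     return json
-- ===== SOURCE B (Python) =====
-- # B: one recursive block builder over a delimiter list replaces A's three near-identical level functions.
-- INDENT = '  '
--
-- KEY_FIELD = '^~\&'
--
-- def is_json_object(value):
--     return '{' in value
--
-- def is_json_boolean(value):
--     return value.lower() == 'true' or value.lower() == 'false'
--
-- def is_json_string(value):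
--     return (not value.isdigit()) and (not is_json_object(value)) and (
--         not is_json_boolean(value))
--
-- def build_json_property(key, value, indent_level):
--     if is_json_string(value):
--         value = '"' + value + '"'
--     indent = INDENT * indent_level
--     return indent + '"' + key + '": ' + value + ',\n'
--
-- def _block(name, pieces, indent_level, delims, top):
--     indent = INDENT * indent_level
--     json = '\n' + indent + '{\n'
--     for index, piece in enumerate(pieces):
--         stripped = piece.replace(delims[0], '') if delims else piece
--         if len(stripped) == 0:
--             continue
--         if top and piece == KEY_FIELD:
--             continue
--         piece_name = name + '.' + str(index + 1)
--         if delims: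
--             subs = piece.split(delims[0])
--             if len(subs) == 1:
--                 value = subs[0]
--             else:
--                 value = _block(piece_name, subs, indent_level + 1, delims[1:], False)
--         else:
--             value = piece
--         json = json + build_json_property(piece_name, value, indent_level + 1)
--     return json + indent + '}\n'
--
-- def segment_fields_to_json(segment_name, segment_fields, indent_level):
--     return _block(segment_name, segment_fields, indent_level, ['^', '~'], True)
-- ===== Notes on version B (the rewrite author's own statement) =====
-- stated objective: simpler
-- what changed: A's three near-duplicate level functions (segment/field/component, each its own loop) are replaced by one recursive block builder parameterised by a delimiter list ['^','~'] and a top-level flag, so all levels share a single loop body.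
import Mathlib
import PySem

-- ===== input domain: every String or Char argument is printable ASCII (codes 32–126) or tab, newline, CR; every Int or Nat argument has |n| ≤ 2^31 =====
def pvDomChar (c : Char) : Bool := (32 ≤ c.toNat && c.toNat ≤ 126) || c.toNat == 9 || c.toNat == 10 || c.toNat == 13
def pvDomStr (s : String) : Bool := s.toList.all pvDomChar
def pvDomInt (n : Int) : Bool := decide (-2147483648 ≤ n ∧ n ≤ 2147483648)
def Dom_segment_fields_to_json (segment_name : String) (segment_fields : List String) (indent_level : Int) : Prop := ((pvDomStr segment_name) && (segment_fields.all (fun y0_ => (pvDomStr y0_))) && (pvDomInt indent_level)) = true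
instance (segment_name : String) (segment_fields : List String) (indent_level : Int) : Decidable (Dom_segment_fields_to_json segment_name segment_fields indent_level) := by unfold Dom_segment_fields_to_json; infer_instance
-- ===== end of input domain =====

-- B replaces A's three near-identical level functions by one recursive block builder over a delimiter list; objective: simpler.

-- ===== PORT A =====
-- shared module constants / helpers (INDENT, KEY_FIELD, is_json_*, build_json_property), used unchanged by both versions
def pvINDENT : String := "  "
def pvKEY_FIELD : String := "^~\\&"
-- '  ' * indent_level (Python string repetition; empty for non-positive levels)
def pyIndent (indent_level : Int) : String := String.ofList (PySem.List.pyRepeat pvINDENT.toList indent_level)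
-- piece.split(sep) for a non-empty literal sep (PySem.Str.split? is none only for sep = "")
def pySplit (s sep : String) : List String := (PySem.Str.split? s sep).getD [s]
def is_json_object (value : String) : Bool := PySem.Str.isIn "{" value
def is_json_boolean (value : String) : Bool := PySem.Str.lower value == "true" || PySem.Str.lower value == "false"
def is_json_string (value : String) : Bool := (!PySem.Str.strIsdigit value) && (!is_json_object value) && (!is_json_boolean value)
def build_json_property (key value : String) (indent_level : Int) : String :=
  let value := if is_json_string value then "\"" ++ value ++ "\"" else value
  pyIndent indent_level ++ "\"" ++ key ++ "\": " ++ value ++ ",\n"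

def component_parts_to_json (component_name : String) (component_parts : List String) (indent_level : Int) : String :=
  let indent := pyIndent indent_level
  let json := "\n" ++ indent ++ "{\n"
  let json := (PySem.List.enumerate component_parts).foldl (fun json ip =>
    if PySem.Str.len ip.2 == 0 then json
    else json ++ build_json_property (component_name ++ "." ++ PySem.Int.toStr (ip.1 + 1)) ip.2 (indent_level + 1)) json
  json ++ indent ++ "}\n"

def field_components_to_json (field_name : String) (field_components : List String) (indent_level : Int) : String :=
  let indent := pyIndent indent_level
  let json := "\n" ++ indent ++ "{\n"
  let json := (PySem.List.enumerate field_components).foldl (fun json ip =>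
    if PySem.Str.len (PySem.Str.replace ip.2 "~" "") == 0 then json
    else
      let component_name := field_name ++ "." ++ PySem.Int.toStr (ip.1 + 1)
      let component_parts := pySplit ip.2 "~"
      let component_parts_json :=
        if component_parts.length == 1 then PySem.List.pyGetD component_parts 0 ""
        else component_parts_to_json component_name component_parts (indent_level + 1)
      json ++ build_json_property component_name component_parts_json (indent_level + 1)) json
  json ++ indent ++ "}\n"

def segment_fields_to_json (segment_name : String) (segment_fields : List String) (indent_level : Int) : String :=
  let indent := pyIndent indent_level
  let json := "\n" ++ indent ++ "{\n"
  let json := (PySem.List.enumerate segment_fields).foldl (fun json ip =>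
    if PySem.Str.len (PySem.Str.replace ip.2 "^" "") == 0 then json
    else if ip.2 == pvKEY_FIELD then json
    else
      let field_name := segment_name ++ "." ++ PySem.Int.toStr (ip.1 + 1)
      let field_components := pySplit ip.2 "^"
      let field_components_json :=
        if field_components.length == 1 then PySem.List.pyGetD field_components 0 ""
        else field_components_to_json field_name field_components (indent_level + 1)
      json ++ build_json_property field_name field_components_json (indent_level + 1)) json
  json ++ indent ++ "}\n"

-- ===== PORT B =====
-- _block(name, pieces, indent_level, delims, top): one recursive builder for all three levels
def pvBlock (name : String) (pieces : List String) (indent_level : Int) (delims : List String) (top : Bool) : String :=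
  match delims with
  | [] =>
    let indent := pyIndent indent_level
    let json := "\n" ++ indent ++ "{\n"
    let json := (PySem.List.enumerate pieces).foldl (fun json ip =>
      if PySem.Str.len ip.2 == 0 then json
      else if top && (ip.2 == pvKEY_FIELD) then json
      else json ++ build_json_property (name ++ "." ++ PySem.Int.toStr (ip.1 + 1)) ip.2 (indent_level + 1)) json
    json ++ indent ++ "}\n"
  | d :: rest =>
    let indent := pyIndent indent_level
    let json := "\n" ++ indent ++ "{\n"
    let json := (PySem.List.enumerate pieces).foldl (fun json ip =>
      if PySem.Str.len (PySem.Str.replace ip.2 d "") == 0 then json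
      else if top && (ip.2 == pvKEY_FIELD) then json
      else
        let piece_name := name ++ "." ++ PySem.Int.toStr (ip.1 + 1)
        let subs := pySplit ip.2 d
        let value :=
          if subs.length == 1 then PySem.List.pyGetD subs 0 ""
          else pvBlock piece_name subs (indent_level + 1) rest false
        json ++ build_json_property piece_name value (indent_level + 1)) json
    json ++ indent ++ "}\n"

def segment_fields_to_json_alt (segment_name : String) (segment_fields : List String) (indent_level : Int) : String :=
  pvBlock segment_name segment_fields indent_level ["^", "~"] true

-- ===== PRECONDITION & SPEC =====
def Spec_segment_fields_to_json (segment_name : String) (segment_fields : List String) (indent_level : Int) (out : String) : Prop := out = segment_fields_to_json_alt segment_name segment_fields indent_level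
instance (segment_name : String) (segment_fields : List String) (indent_level : Int) (out : String) : Decidable (Spec_segment_fields_to_json segment_name segment_fields indent_level out) := by unfold Spec_segment_fields_to_json; infer_instance

-- ===== CLAIM (what is proved, stated in full; the proofs are below) =====
def Claim_equal_segment_fields_to_json : Prop := ∀ (segment_name : String) (segment_fields : List String) (indent_level : Int), Dom_segment_fields_to_json segment_name segment_fields indent_level → Spec_segment_fields_to_json segment_name segment_fields indent_level (segment_fields_to_json segment_name segment_fields indent_level)

-- ===== LEMMAS AND PROOFS =====

-- the leaf level of B's recursion (delims = [], top = false) is exactly A's component_parts_to_json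
theorem pvBlock_nil_eq (n : String) (ps : List String) (l : Int) :
    pvBlock n ps l [] false = component_parts_to_json n ps l := by
  unfold pvBlock component_parts_to_json
  simp

-- the middle level (delims = ["~"], top = false) is exactly A's field_components_to_json
theorem pvBlock_tilde_eq (n : String) (cs : List String) (l : Int) :
    pvBlock n cs l ["~"] false = field_components_to_json n cs l := by
  unfold pvBlock field_components_to_json
  simp [pvBlock_nil_eq]

-- ===== VERDICT (by name: the statement is the Claim_ definition above) =====
theorem segment_fields_to_json_spec : Claim_equal_segment_fields_to_json := by
  intro n fs l _
  unfold Spec_segment_fields_to_json segment_fields_to_json_alt pvBlock segment_fields_to_json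
  simp [pvBlock_tilde_eq]
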